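-- pv_equiv track=rewrite | github.com/RiviereGregory/pythonEnigmes | enigme3.py | maximum_in_pile
-- ===== SOURCE A (Python) =====
-- def maximum_in_pile(pile_in, k):
--     maxi = pile_in[k]
--     j = k
--     for i in range(k, len(pile_in)):
--         if pile_in[i] > maxi:
--             maxi = pile_in[i]
--             j = i
--     return j
-- ===== SOURCE B (Python) =====
-- def maximum_in_pile(pile_in, k):
--     sub = pile_in[k:]
--
--     def best(lo, hi):
--         # first index of the maximum of sub[lo:hi], by divide and conquer
--         if hi - lo == 1:
--             return lo
--         mid = (lo + hi) // 2
--         l = best(lo, mid)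
--         r = best(mid, hi)
--         return l if sub[l] >= sub[r] else r
--
--     return k + best(0, len(sub))
-- ===== Notes on version B (the rewrite author's own statement) =====
-- stated objective: alternative
-- what changed: Divide-and-conquer argmax: B halves the suffix pile_in[k:], recursively finds the first-max index of each half and combines them with a >= tie-break, instead of A's single left-to-right index loop tracking the running maximum.
-- intended difference: For in-range negative k where some element before the final |k|-element suffix exceeds that suffix's maximum, A's range(k, len) walks the wrapped negative indices and then rescans the whole list, returning the nonnegative index of the first global maximum (outside the requested suffix pile_in[k:]); B returns the negative index k + offset of the first suffix maximum, the intended 'index of max of pile_in[k:]' value. — e.g. on maximum_in_pile([5, 1], -1): A returns 0, B returns -1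
import Mathlib
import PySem

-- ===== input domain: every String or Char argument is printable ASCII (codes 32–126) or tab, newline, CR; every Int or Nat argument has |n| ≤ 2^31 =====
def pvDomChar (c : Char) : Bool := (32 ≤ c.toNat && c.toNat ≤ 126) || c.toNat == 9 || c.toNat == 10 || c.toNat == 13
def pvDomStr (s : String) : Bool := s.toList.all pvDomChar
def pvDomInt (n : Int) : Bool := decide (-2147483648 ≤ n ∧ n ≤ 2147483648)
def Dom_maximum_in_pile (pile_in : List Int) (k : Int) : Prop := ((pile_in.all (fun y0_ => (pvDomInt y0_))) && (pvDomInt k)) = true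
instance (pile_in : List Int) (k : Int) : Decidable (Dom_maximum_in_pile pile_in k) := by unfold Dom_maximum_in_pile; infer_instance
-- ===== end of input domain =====

-- B replaces A's single left-to-right scan (tracking running max and its index) by a
-- divide-and-conquer argmax over the slice pile_in[k:] (objective: alternative).

-- ===== PORT A =====
def maximum_in_pile (pile_in : List Int) (k : Int) : Int :=
  match PySem.List.pyGet? pile_in k with
  | none => 0   -- pile_in[k] raises IndexError here; excluded by Pre_
  | some maxi =>
    ((PySem.List.pyRange k pile_in.length).foldl
      (fun (s : Int × Int) i =>
        if PySem.List.pyGetD pile_in i 0 > s.1 then (PySem.List.pyGetD pile_in i 0, i) else s)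
      (maxi, k)).2

-- ===== PORT B =====
-- Source B's recursive helper 'best(lo, hi)': first index of the maximum of sub[lo:hi].
-- Source B's base case is 'hi - lo == 1'; the guard here is widened to 'hi ≤ lo + 1' only to
-- make the recursion total (Python never returns on hi ≤ lo: it recurses forever; outside Pre_).
def pvBest (sub : List Int) (lo hi : Nat) : Nat :=
  if hi ≤ lo + 1 then lo
  else
    let mid := (lo + hi) / 2
    let l := pvBest sub lo mid
    let r := pvBest sub mid hi
    if PySem.List.pyGetD sub (l : Int) 0 ≥ PySem.List.pyGetD sub (r : Int) 0 then l else r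
termination_by hi - lo
decreasing_by all_goals omega

def maximum_in_pile_alt (pile_in : List Int) (k : Int) : Int :=
  let sub := PySem.List.slice pile_in (some k) none
  k + (pvBest sub 0 sub.length : Int)

-- ===== PRECONDITION & SPEC =====
-- Pre_ admits exactly the inputs where Python A returns: pile_in[k] must not raise IndexError.
def Pre_maximum_in_pile (pile_in : List Int) (k : Int) : Prop :=
  -(pile_in.length : Int) ≤ k ∧ k < (pile_in.length : Int)
instance (pile_in : List Int) (k : Int) : Decidable (Pre_maximum_in_pile pile_in k) := by
  unfold Pre_maximum_in_pile; infer_instance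
def pvWitness_maximum_in_pile : List Int × Int := ([3, 1, 2], 1)

-- For in-range negative k where some element before the final |k|-element suffix exceeds that
-- suffix's maximum, A's range(k, len) walks the wrapped negative indices and then rescans the
-- whole list, returning the nonnegative index of the first global maximum (outside the requested
-- suffix pile_in[k:]); B returns the negative index k + offset of the first suffix maximum, the
-- intended 'index of max of pile_in[k:]' value.
def D_maximum_in_pile (pile_in : List Int) (k : Int) : Prop :=
  k < 0 ∧ ∃ a ∈ pile_in.take ((pile_in.length : Int) + k).toNat,
    ∀ b ∈ pile_in.drop ((pile_in.length : Int) + k).toNat, b < a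
instance (pile_in : List Int) (k : Int) : Decidable (D_maximum_in_pile pile_in k) := by
  unfold D_maximum_in_pile; infer_instance

def Spec_maximum_in_pile (pile_in : List Int) (k : Int) (out : Int) : Prop :=
  ¬ D_maximum_in_pile pile_in k → out = maximum_in_pile_alt pile_in k
instance (pile_in : List Int) (k : Int) (out : Int) : Decidable (Spec_maximum_in_pile pile_in k out) := by
  unfold Spec_maximum_in_pile; infer_instance

def pvDiffWitness_maximum_in_pile : List Int × Int := ([5, 1], -1)
def pvDiffWitnessOut_maximum_in_pile : Int × Int := (0, -1)

-- ===== CLAIM (what is proved, stated in full; the proofs are below) =====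
def Claim_unchanged_maximum_in_pile : Prop := ∀ (pile_in : List Int) (k : Int), Dom_maximum_in_pile pile_in k → Pre_maximum_in_pile pile_in k → Spec_maximum_in_pile pile_in k (maximum_in_pile pile_in k)
def Claim_changed_maximum_in_pile : Prop := Dom_maximum_in_pile (pvDiffWitness_maximum_in_pile.1) (pvDiffWitness_maximum_in_pile.2) ∧ Pre_maximum_in_pile (pvDiffWitness_maximum_in_pile.1) (pvDiffWitness_maximum_in_pile.2) ∧ D_maximum_in_pile (pvDiffWitness_maximum_in_pile.1) (pvDiffWitness_maximum_in_pile.2) ∧ maximum_in_pile (pvDiffWitness_maximum_in_pile.1) (pvDiffWitness_maximum_in_pile.2) = pvDiffWitnessOut_maximum_in_pile.1 ∧ maximum_in_pile_alt (pvDiffWitness_maximum_in_pile.1) (pvDiffWitness_maximum_in_pile.2) = pvDiffWitnessOut_maximum_in_pile.2 ∧ pvDiffWitnessOut_maximum_in_pile.1 ≠ pvDiffWitnessOut_maximum_in_pile.2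
def Claim_exact_maximum_in_pile : Prop := ∀ (pile_in : List Int) (k : Int), Dom_maximum_in_pile pile_in k → Pre_maximum_in_pile pile_in k → D_maximum_in_pile pile_in k → maximum_in_pile pile_in k ≠ maximum_in_pile_alt pile_in k

-- ===== LEMMAS AND PROOFS =====

-- A's loop state machine, abstracted over the list of scanned values and the running index.
def pvLoop : List Int → Int → Int × Int → Int × Int
  | [], _, s => s
  | v :: t, i, s => pvLoop t (i + 1) (if s.1 < v then (v, i) else s)

theorem pvLoop_le (vs : List Int) (i : Int) (s : Int × Int)
    (h : ∀ v ∈ vs, v ≤ s.1) : pvLoop vs i s = s := by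
  induction vs generalizing i with
  | nil => rfl
  | cons v t ih =>
    have hv : v ≤ s.1 := h v (by simp)
    simp only [pvLoop, if_neg (not_lt.mpr hv)]
    exact ih _ (fun w hw => h w (by simp [hw]))

theorem pvLoop_fst (vs : List Int) (i : Int) (s : Int × Int) :
    (pvLoop vs i s).1 = vs.foldl max s.1 := by
  induction vs generalizing i s with
  | nil => rfl
  | cons v t ih =>
    simp only [pvLoop, List.foldl_cons]
    rw [ih]
    congr 1
    by_cases h : s.1 < v
    · simp [if_pos h, max_eq_right (le_of_lt h)]
    · simp [if_neg h, max_eq_left (not_lt.mp h)]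

theorem pvLoop_append (xs ys : List Int) (i : Int) (s : Int × Int) :
    pvLoop (xs ++ ys) i s = pvLoop ys (i + xs.length) (pvLoop xs i s) := by
  induction xs generalizing i s with
  | nil => simp [pvLoop]
  | cons v t ih =>
    simp only [List.cons_append, pvLoop, ih]
    congr 1
    push_cast [List.length_cons]
    omega

theorem pvLoop_snd_of_gt (vs : List Int) (i : Int) (m0 j0 : Int) (t0 : Nat)
    (hgt : ∃ v ∈ vs, m0 < v)
    (hidx : PySem.List.index? vs (vs.foldl max m0) = some t0) :
    (pvLoop vs i (m0, j0)).2 = i + t0 := by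
  induction vs generalizing i m0 j0 t0 with
  | nil => obtain ⟨v, hv, _⟩ := hgt; simp at hv
  | cons v t ih =>
    by_cases hm : m0 < v
    · simp only [pvLoop, if_pos hm]
      by_cases ht : ∃ w ∈ t, v < w
      · -- the max lies strictly above v, hence in t
        have hM : (v :: t).foldl max m0 = t.foldl max v := by
          simp [List.foldl_cons, max_eq_right (le_of_lt hm)]
        have hvne : v ≠ (v :: t).foldl max m0 := by
          obtain ⟨w, hw, hvw⟩ := ht
          have := (PySem.List.le_foldl_max t v).2 w hw
          rw [hM]; omega
        rw [PySem.List.index?_cons_of_ne t hvne] at hidx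
        obtain ⟨t1, hidx1, ht1⟩ := Option.map_eq_some_iff.mp hidx
        have := ih (i + 1) v i t1 ht (by rw [← hM]; exact hidx1)
        rw [this]; omega
      · -- v is the maximum: everything in t is ≤ v
        push_neg at ht
        have hM : (v :: t).foldl max m0 = v := by
          simp only [List.foldl_cons, max_eq_right (le_of_lt hm)]
          exact le_antisymm (by
            rcases PySem.List.foldl_max_mem t v with h | h
            · omega
            · exact ht _ h) (PySem.List.le_foldl_max t v).1
        rw [hM, PySem.List.index?_cons_self] at hidx
        injection hidx with h0
        rw [pvLoop_le t (i + 1) (v, i) (fun w hw => ht w hw)]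
        simp [← h0]
    · -- v does not improve the accumulator
      simp only [pvLoop, if_neg hm]
      have hvle : v ≤ m0 := not_lt.mp hm
      have hgt' : ∃ w ∈ t, m0 < w := by
        obtain ⟨w, hw, hmw⟩ := hgt
        rcases List.mem_cons.mp hw with h | h
        · omega
        · exact ⟨w, h, hmw⟩
      have hM : (v :: t).foldl max m0 = t.foldl max m0 := by
        simp [List.foldl_cons, max_eq_left hvle]
      have hvne : v ≠ (v :: t).foldl max m0 := by
        obtain ⟨w, hw, hmw⟩ := hgt'
        have := (PySem.List.le_foldl_max t m0).2 w hw
        rw [hM]; omega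
      rw [PySem.List.index?_cons_of_ne t hvne] at hidx
      obtain ⟨t1, hidx1, ht1⟩ := Option.map_eq_some_iff.mp hidx
      have := ih (i + 1) m0 j0 t1 hgt' (by rw [← hM]; exact hidx1)
      rw [this]; omega

theorem pvLoop_head (v0 : Int) (t : List Int) (i : Int) (t0 : Nat)
    (hidx : PySem.List.index? (v0 :: t) (t.foldl max v0) = some t0) :
    (pvLoop (v0 :: t) i (v0, i)).2 = i + t0 := by
  have hstep : pvLoop (v0 :: t) i (v0, i) = pvLoop t (i + 1) (v0, i) := by
    simp [pvLoop]
  rw [hstep]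
  by_cases ht : ∃ w ∈ t, v0 < w
  · have hvne : v0 ≠ t.foldl max v0 := by
      obtain ⟨w, hw, hvw⟩ := ht
      have := (PySem.List.le_foldl_max t v0).2 w hw
      omega
    rw [PySem.List.index?_cons_of_ne t hvne] at hidx
    obtain ⟨t1, hidx1, ht1⟩ := Option.map_eq_some_iff.mp hidx
    have := pvLoop_snd_of_gt t (i + 1) v0 i t1 ht hidx1
    rw [this]; omega
  · push_neg at ht
    have hM : t.foldl max v0 = v0 :=
      le_antisymm (by
        rcases PySem.List.foldl_max_mem t v0 with h | h
        · omega
        · exact ht _ h) (PySem.List.le_foldl_max t v0).1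
    rw [hM, PySem.List.index?_cons_self] at hidx
    injection hidx with h0
    rw [pvLoop_le t (i + 1) (v0, i) ht]
    simp [← h0]

-- A's fold over range(k, len) equals pvLoop over the scanned values.
theorem pvFold_eq_pvLoop (pile : List Int) (a b : Int) (s : Int × Int) :
    ((PySem.List.pyRange a b).foldl
      (fun (s : Int × Int) i =>
        if PySem.List.pyGetD pile i 0 > s.1 then (PySem.List.pyGetD pile i 0, i) else s) s)
    = pvLoop ((PySem.List.pyRange a b).map (fun i => PySem.List.pyGetD pile i 0)) a s := by
  by_cases hab : b ≤ a
  · rw [PySem.List.pyRange_one_eq_nil hab]; rfl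
  · push_neg at hab
    have hn : (b - a).toNat ≠ 0 := by omega
    generalize hN : (b - a).toNat = N at *
    induction N generalizing a s with
    | zero => omega
    | succ n ih =>
      rw [PySem.List.pyRange_one_cons hab]
      simp only [List.foldl_cons, List.map_cons, pvLoop]
      by_cases hab' : a + 1 < b
      · exact ih (a + 1) _ hab' (by omega) (by omega)
      · have : b = a + 1 := by omega
        subst this
        rw [PySem.List.pyRange_one_eq_nil (by omega)]
        rfl

-- The scanned values for a negative start: the wrapped suffix.
theorem pvMap_neg (pile : List Int) (c : Nat) (hc : c ≤ pile.length) :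
    (PySem.List.pyRange (-(c : Int)) 0).map (fun i => PySem.List.pyGetD pile i 0)
      = pile.drop (pile.length - c) := by
  induction c with
  | zero => simp [PySem.List.pyRange_one_eq_nil]
  | succ n ih =>
    have h1 : (-(((n : Nat) + 1 : Nat) : Int)) < 0 := by push_cast; omega
    rw [PySem.List.pyRange_one_cons h1]
    have h2 : (-(((n : Nat) + 1 : Nat) : Int)) + 1 = -((n : Nat) : Int) := by push_cast; ring
    rw [h2]
    simp only [List.map_cons]
    rw [ih (by omega)]
    rw [PySem.List.pyGetD_neg_natCast pile (n + 1) 0 (by omega) hc]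
    have h3 : pile.length - (n + 1) < pile.length := by omega
    rw [List.drop_eq_getElem_cons h3]
    have h4 : pile.length - (n + 1) + 1 = pile.length - n := by omega
    rw [h4]

-- B's recursion: pvBest sub lo hi is in [lo, hi), dominates every index of [lo, hi),
-- and strictly dominates every earlier index (first-occurrence argmax).
theorem pvBest_spec (sub : List Int) (lo hi : Nat) (h1 : lo < hi) (h2 : hi ≤ sub.length) :
    lo ≤ pvBest sub lo hi ∧ pvBest sub lo hi < hi ∧
    (∀ i, lo ≤ i → i < hi → sub.getD i 0 ≤ sub.getD (pvBest sub lo hi) 0) ∧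
    (∀ i, lo ≤ i → i < pvBest sub lo hi → sub.getD i 0 < sub.getD (pvBest sub lo hi) 0) := by
  generalize hN : hi - lo = N
  induction N using Nat.strong_induction_on generalizing lo hi with
  | _ N ih =>
    rw [pvBest]
    by_cases hbase : hi ≤ lo + 1
    · have : hi = lo + 1 := by omega
      subst this
      simp only [if_pos (le_refl _)]
      refine ⟨le_refl _, by omega, ?_, ?_⟩
      · intro i hi1 hi2
        have : i = lo := by omega
        subst this; exact le_refl _
      · intro i hi1 hi2; omega
    · simp only [if_neg hbase, PySem.List.pyGetD_natCast]
      set mid := (lo + hi) / 2 with hmid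
      have hm1 : lo < mid := by omega
      have hm2 : mid < hi := by omega
      obtain ⟨hl1, hl2, hlmax, hlfst⟩ :=
        ih (mid - lo) (by omega) lo mid hm1 (by omega) rfl
      obtain ⟨hr1, hr2, hrmax, hrfst⟩ :=
        ih (hi - mid) (by omega) mid hi hm2 h2 rfl
      set l := pvBest sub lo mid
      set r := pvBest sub mid hi
      by_cases hge : sub.getD r 0 ≤ sub.getD l 0
      · simp only [if_pos hge]
        refine ⟨hl1, by omega, ?_, ?_⟩
        · intro i hi1 hi2
          by_cases him : i < mid
          · exact hlmax i hi1 him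
          · exact le_trans (hrmax i (by omega) hi2) hge
        · intro i hi1 hi2
          exact hlfst i hi1 hi2
      · push_neg at hge
        simp only [if_neg (not_le.mpr hge)]
        refine ⟨by omega, hr2, ?_, ?_⟩
        · intro i hi1 hi2
          by_cases him : i < mid
          · exact le_trans (hlmax i hi1 him) (le_of_lt hge)
          · exact hrmax i (by omega) hi2
        · intro i hi1 hi2
          by_cases him : i < mid
          · exact lt_of_le_of_lt (hlmax i hi1 him) hge
          · exact hrfst i (by omega) hi2

-- The first-occurrence argmax is unique: pvBest over the whole list equals the first
-- index of the list's maximum.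
theorem pvBest_eq_index (v0 : Int) (t : List Int) (t0 : Nat)
    (ht0 : PySem.List.index? (v0 :: t) (t.foldl max v0) = some t0) :
    pvBest (v0 :: t) 0 (v0 :: t).length = t0 := by
  set xs := v0 :: t with hxs
  set M := t.foldl max v0 with hM
  have hle : ∀ y ∈ xs, y ≤ M := by
    intro y hy
    rcases List.mem_cons.mp hy with h | h
    · rw [h]; exact (PySem.List.le_foldl_max t v0).1
    · exact (PySem.List.le_foldl_max t v0).2 y h
  obtain ⟨ht0lt, ht0eq, ht0fst⟩ := PySem.List.getElem_of_index?_eq_some ht0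
  obtain ⟨hj1, hj2, hjmax, hjfst⟩ :=
    pvBest_spec xs 0 xs.length (by simp [hxs]) (le_refl _)
  set j := pvBest xs 0 xs.length
  have hjval : xs.getD j 0 = M := by
    have h1 : xs.getD j 0 ≤ M := by
      rw [List.getD_eq_getElem xs 0 hj2]
      exact hle _ (List.getElem_mem hj2)
    have h2 : M ≤ xs.getD j 0 := by
      have := hjmax t0 (Nat.zero_le _) ht0lt
      rwa [List.getD_eq_getElem xs 0 ht0lt, ht0eq] at this
    omega
  by_contra hne
  rcases Nat.lt_or_ge j t0 with h | h
  · -- j < t0: xs[j] = M contradicts t0 being the first index of M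
    exact ht0fst j h (by rw [← List.getD_eq_getElem xs 0 hj2, hjval])
  · have h' : t0 < j := by omega
    have := hjfst t0 (Nat.zero_le _) h'
    rw [hjval, List.getD_eq_getElem xs 0 ht0lt, ht0eq] at this
    omega

-- B's computation, given the slice and the first index of its maximum.
theorem pvAlt_eq (pile : List Int) (k : Int) (v0 : Int) (t : List Int) (t0 : Nat)
    (hsub : PySem.List.slice pile (some k) none = v0 :: t)
    (ht0 : PySem.List.index? (v0 :: t) (t.foldl max v0) = some t0) :
    maximum_in_pile_alt pile k = k + t0 := by
  unfold maximum_in_pile_alt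
  simp only [hsub]
  rw [pvBest_eq_index v0 t t0 ht0]

theorem pvMax_mem (v0 : Int) (t : List Int) : t.foldl max v0 ∈ v0 :: t := by
  rcases PySem.List.foldl_max_mem t v0 with h | h
  · rw [h]; exact List.mem_cons_self
  · exact List.mem_cons_of_mem _ h

theorem pvIndex_exists (v0 : Int) (t : List Int) :
    ∃ t0, PySem.List.index? (v0 :: t) (t.foldl max v0) = some t0 := by
  have h := (PySem.List.index?_isSome_iff (v0 :: t) (t.foldl max v0)).mpr (pvMax_mem v0 t)
  exact Option.isSome_iff_exists.mp h

theorem pvDrop_cons_head (pile : List Int) (m : Nat) (v0 : Int) (t : List Int)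
    (hd : pile.drop m = v0 :: t) : pile[m]? = some v0 := by
  have h := congrArg (fun l => l[0]?) hd
  simpa [List.getElem?_drop] using h

-- A's value for 0 ≤ k < len.
theorem pvA_nonneg (pile : List Int) (k : Int) (v0 : Int) (t : List Int) (t0 : Nat)
    (h0 : 0 ≤ k) (h1 : k < (pile.length : Int))
    (hd : pile.drop k.toNat = v0 :: t)
    (ht0 : PySem.List.index? (v0 :: t) (t.foldl max v0) = some t0) :
    maximum_in_pile pile k = k + t0 := by
  unfold maximum_in_pile
  rw [PySem.List.pyGet?_of_nonneg_of_lt pile h0 h1, pvDrop_cons_head pile k.toNat v0 t hd]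
  simp only []
  rw [pvFold_eq_pvLoop, PySem.List.map_pyGetD_pyRange' pile 0 h0, hd]
  exact pvLoop_head v0 t k t0 ht0

-- A's loop for negative in-range k decomposes into the wrapped-suffix phase and a full rescan.
theorem pvA_neg_decomp (pile : List Int) (k : Int) (c : Nat) (v0 : Int) (t : List Int)
    (hc1 : 0 < c) (hc2 : c ≤ pile.length) (hk : k = -(c : Int))
    (hd : pile.drop (pile.length - c) = v0 :: t) :
    maximum_in_pile pile k = (pvLoop pile 0 (pvLoop (v0 :: t) k (v0, k))).2 := by
  unfold maximum_in_pile
  have hget : PySem.List.pyGet? pile k = some v0 := by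
    rw [hk, PySem.List.pyGet?_neg_natCast pile c hc1 hc2]
    exact pvDrop_cons_head pile (pile.length - c) v0 t hd
  rw [hget]
  simp only []
  rw [pvFold_eq_pvLoop]
  rw [PySem.List.pyRange_one_append k 0 (pile.length : Int) (by omega) (by positivity)]
  rw [List.map_append]
  have hm1 : (PySem.List.pyRange k 0).map (fun i => PySem.List.pyGetD pile i 0) = v0 :: t := by
    rw [hk, pvMap_neg pile c hc2, hd]
  rw [hm1, PySem.List.map_pyGetD_pyRange_zero' pile 0, pvLoop_append]
  have hlen : ((v0 :: t).length : Int) = (c : Int) := by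
    have := congrArg List.length hd
    simp only [List.length_drop] at this
    rw [← this]
    omega
  rw [hlen]
  have : k + (c : Int) = 0 := by omega
  rw [this]

-- Every element of the suffix is bounded by the suffix maximum.
theorem pvSuffix_le (v0 : Int) (t : List Int) :
    ∀ b ∈ v0 :: t, b ≤ t.foldl max v0 := by
  intro b hb
  rcases List.mem_cons.mp hb with h | h
  · rw [h]; exact (PySem.List.le_foldl_max t v0).1
  · exact (PySem.List.le_foldl_max t v0).2 b h

-- ===== VERDICT (by name: the statement is the Claim_ definition above) =====
theorem maximum_in_pile_spec : Claim_unchanged_maximum_in_pile := by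
  intro pile k _hdom hpre hnD
  obtain ⟨hpre1, hpre2⟩ := hpre
  by_cases h0 : 0 ≤ k
  · -- nonnegative k: both programs work on pile.drop k.toNat
    have hklt : k.toNat < pile.length := by omega
    rcases hd : pile.drop k.toNat with _ | ⟨v0, t⟩
    · rw [List.drop_eq_nil_iff] at hd; omega
    obtain ⟨t0, ht0⟩ := pvIndex_exists v0 t
    have hsub : PySem.List.slice pile (some k) none = v0 :: t := by
      rw [PySem.List.slice_from pile h0, hd]
    rw [pvA_nonneg pile k v0 t t0 h0 hpre2 hd ht0, pvAlt_eq pile k v0 t t0 hsub ht0]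
  · -- negative in-range k, outside D_: the suffix maximum is global, the rescan is inert
    push_neg at h0
    set c : Nat := (-k).toNat with hc
    have hk : k = -(c : Int) := by omega
    have hc1 : 0 < c := by omega
    have hc2 : c ≤ pile.length := by omega
    rcases hd : pile.drop (pile.length - c) with _ | ⟨v0, t⟩
    · rw [List.drop_eq_nil_iff] at hd; omega
    obtain ⟨t0, ht0⟩ := pvIndex_exists v0 t
    have hsub : PySem.List.slice pile (some k) none = v0 :: t := by
      rw [hk, PySem.List.slice_from_neg_natCast pile c hc1, hd]
    rw [pvA_neg_decomp pile k c v0 t hc1 hc2 hk hd]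
    set s1 := pvLoop (v0 :: t) k (v0, k) with hs1
    have hfst : s1.1 = t.foldl max v0 := by
      rw [hs1, pvLoop_fst]
      simp
    have hsnd : s1.2 = k + t0 := pvLoop_head v0 t k t0 ht0
    -- ¬ D_ means no element before the suffix strictly exceeds the whole suffix
    have htN : ((pile.length : Int) + k).toNat = pile.length - c := by omega
    have hall : ∀ v ∈ pile, v ≤ s1.1 := by
      intro v hv
      rw [hfst]
      rw [← List.take_append_drop (pile.length - c) pile] at hv
      rcases List.mem_append.mp hv with h | h
      · by_contra hgt
        push_neg at hgt
        exact hnD ⟨by omega, v, by rw [htN]; exact h, by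
          intro b hb
          rw [htN, hd] at hb
          have := pvSuffix_le v0 t b hb
          omega⟩
      · rw [hd] at h
        exact pvSuffix_le v0 t v h
    rw [pvLoop_le pile 0 s1 hall, hsnd, pvAlt_eq pile k v0 t t0 hsub ht0]
theorem maximum_in_pile_changed : Claim_changed_maximum_in_pile := by
  unfold Claim_changed_maximum_in_pile
  refine ⟨by decide, by decide, by decide, by decide, ?_, by decide⟩
  show maximum_in_pile_alt [5, 1] (-1) = -1
  unfold maximum_in_pile_alt
  rw [show PySem.List.slice ([5, 1] : List Int) (some (-1)) none = [1] from by decide]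
  show (-1 : Int) + (pvBest [1] 0 ([1] : List Int).length : Int) = -1
  rw [show pvBest [1] 0 ([1] : List Int).length = 0 from by rw [pvBest]; rfl]
  decide
theorem maximum_in_pile_tight : Claim_exact_maximum_in_pile := by
  intro pile k _hdom hpre hD
  obtain ⟨hpre1, hpre2⟩ := hpre
  obtain ⟨hk0, a, ha, hba⟩ := hD
  set c : Nat := (-k).toNat with hc
  have hk : k = -(c : Int) := by omega
  have hc1 : 0 < c := by omega
  have hc2 : c ≤ pile.length := by omega
  have htN : ((pile.length : Int) + k).toNat = pile.length - c := by omega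
  rw [htN] at ha hba
  rcases hd : pile.drop (pile.length - c) with _ | ⟨v0, t⟩
  · rw [List.drop_eq_nil_iff] at hd; omega
  obtain ⟨t0, ht0⟩ := pvIndex_exists v0 t
  have hsub : PySem.List.slice pile (some k) none = v0 :: t := by
    rw [hk, PySem.List.slice_from_neg_natCast pile c hc1, hd]
  -- B returns a negative index into the suffix
  have hBlt : k + (t0 : Int) < 0 := by
    obtain ⟨hlt, -, -⟩ := PySem.List.getElem_of_index?_eq_some ht0
    have hlen : (v0 :: t).length = c := by
      have := congrArg List.length hd
      simp only [List.length_drop] at this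
      omega
    omega
  -- A's rescan finds the strictly larger prefix element: a nonnegative index
  rw [pvA_neg_decomp pile k c v0 t hc1 hc2 hk hd]
  set s1 := pvLoop (v0 :: t) k (v0, k) with hs1
  have hfst : s1.1 = t.foldl max v0 := by
    rw [hs1, pvLoop_fst]
    simp
  have hMlt : s1.1 < a := by
    rw [hfst]
    exact hba _ (by rw [hd]; exact pvMax_mem v0 t)
  have hgt : ∃ v ∈ pile, s1.1 < v := ⟨a, List.mem_of_mem_take ha, hMlt⟩
  have hMmem : pile.foldl max s1.1 ∈ pile := by
    rcases PySem.List.foldl_max_mem pile s1.1 with h | h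
    · exfalso
      have := (PySem.List.le_foldl_max pile s1.1).2 a (List.mem_of_mem_take ha)
      omega
    · exact h
  obtain ⟨t1, ht1⟩ := Option.isSome_iff_exists.mp
    ((PySem.List.index?_isSome_iff pile (pile.foldl max s1.1)).mpr hMmem)
  have hA : (pvLoop pile 0 s1).2 = 0 + (t1 : Int) := by
    have hs1eq : s1 = (s1.1, s1.2) := rfl
    rw [hs1eq]
    exact pvLoop_snd_of_gt pile 0 s1.1 s1.2 t1 hgt ht1
  rw [hA, pvAlt_eq pile k v0 t t0 hsub ht0]
  omega
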